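-- pv_equiv track=rewrite | github.com/CallMeDas/Python-Practice-Set | PracticeSet-1/39_SequentialMatrix.py | SquareMatrix
-- ===== SOURCE A (Python) =====
-- def SquareMatrix(size):
--     matrix = []
--     num = 1
--     for i in range(size):
--         row = []
--         for j in range(size):
--             row.append(num)
--             num += 1
--         matrix.append(row)
--     return matrix
-- ===== SOURCE B (Python) =====
-- def SquareMatrix(size):
--     return [list(range(i * size + 1, (i + 1) * size + 1)) for i in range(size)]
-- ===== Notes on version B (the rewrite author's own statement) =====
-- stated objective: idiomatic
-- what changed: Dropped the mutable running counter and inner append loop; each row is computed in closed form as range(i*size+1, (i+1)*size+1) from its index.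
import Mathlib
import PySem

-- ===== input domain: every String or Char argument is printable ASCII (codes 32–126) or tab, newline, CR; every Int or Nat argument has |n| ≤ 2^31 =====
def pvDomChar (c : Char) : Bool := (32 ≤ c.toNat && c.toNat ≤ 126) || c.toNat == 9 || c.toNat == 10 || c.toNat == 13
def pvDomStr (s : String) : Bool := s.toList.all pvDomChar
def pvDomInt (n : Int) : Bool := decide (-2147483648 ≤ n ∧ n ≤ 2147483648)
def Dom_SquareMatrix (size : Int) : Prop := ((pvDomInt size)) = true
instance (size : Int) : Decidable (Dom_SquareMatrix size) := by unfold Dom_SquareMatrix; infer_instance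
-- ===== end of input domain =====

-- B replaces A's running counter with a closed-form range per row index (idiomatic).

-- ===== PORT A =====
-- A: counter num threaded through nested loops, appending to row and matrix.
def SquareMatrix (size : Int) : List (List Int) :=
  let st := (PySem.List.pyRange 0 size 1).foldl
    (fun (st : List (List Int) × Int) _i =>
      let rn := (PySem.List.pyRange 0 size 1).foldl
        (fun (rn : List Int × Int) _j => (rn.1 ++ [rn.2], rn.2 + 1)) ([], st.2)
      (st.1 ++ [rn.1], rn.2))
    ([], 1)
  st.1

-- ===== PORT B =====
-- B: each row is the closed-form range i*size+1 .. (i+1)*size.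
def SquareMatrix_alt (size : Int) : List (List Int) :=
  (PySem.List.pyRange 0 size 1).map
    (fun i => PySem.List.pyRange (i * size + 1) ((i + 1) * size + 1) 1)

-- ===== PRECONDITION & SPEC =====
def Spec_SquareMatrix (size : Int) (out : List (List Int)) : Prop := out = SquareMatrix_alt size
instance (size : Int) (out : List (List Int)) : Decidable (Spec_SquareMatrix size out) := by unfold Spec_SquareMatrix; infer_instance

-- ===== CLAIM (what is proved, stated in full; the proofs are below) =====
def Claim_equal_SquareMatrix : Prop := ∀ (size : Int), Dom_SquareMatrix size → Spec_SquareMatrix size (SquareMatrix size)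

-- ===== LEMMAS AND PROOFS =====

-- rows c k m: the k rows produced by A's outer loop starting at counter c, each of length m
def pvRows (c : Int) (k : Nat) (m : Nat) : List (List Int) :=
  match k with
  | 0 => []
  | k + 1 => PySem.List.pyRange c (c + m) 1 :: pvRows (c + m) k m

-- A's inner loop from counter c over a list of length |l| yields the range c .. c+|l|-1 and counter c+|l|.
theorem pvInner (l : List Int) (acc : List Int) (c : Int) :
    l.foldl (fun (rn : List Int × Int) _ => (rn.1 ++ [rn.2], rn.2 + 1)) (acc, c)
      = (acc ++ PySem.List.pyRange c (c + l.length) 1, c + l.length) := by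
  induction l generalizing acc c with
  | nil => simp [PySem.List.pyRange_one_eq_nil (le_refl c)]
  | cons x xs ih =>
    simp only [List.foldl_cons, List.length_cons]
    rw [ih]
    simp only [Prod.mk.injEq]
    refine ⟨?_, by push_cast; ring⟩
    rw [show (c : Int) + ↑(xs.length + 1) = c + 1 + xs.length by push_cast; ring]
    conv_rhs => rw [PySem.List.pyRange_one_cons (show c < c + 1 + (xs.length : Int) by omega)]
    simp only [List.append_assoc, List.singleton_append]

-- A's outer loop, with the inner fold replaced by its value (via pvInner at the use site).
theorem pvOuter (m : Nat) (l : List Int) (acc : List (List Int)) (c : Int) :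
    l.foldl
      (fun (st : List (List Int) × Int) _ =>
        (st.1 ++ [PySem.List.pyRange st.2 (st.2 + m) 1], st.2 + m))
      (acc, c)
      = (acc ++ pvRows c l.length m, c + l.length * m) := by
  induction l generalizing acc c with
  | nil => simp [pvRows]
  | cons x xs ih =>
    simp only [List.foldl_cons, List.length_cons]
    rw [ih]
    simp only [Prod.mk.injEq]
    refine ⟨by simp [pvRows], by push_cast; ring⟩

theorem pvRows_eq_map (k m : Nat) (c : Int) :
    pvRows c k m
      = (List.range k).map
          (fun j : Nat => PySem.List.pyRange (c + (j : Int) * m) (c + ((j : Int) + 1) * m) 1) := by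
  induction k generalizing c with
  | zero => simp [pvRows]
  | succ k ih =>
    rw [pvRows, ih, List.range_succ_eq_map]
    simp only [List.map_cons, List.map_map]
    congr 1
    · congr 1 <;> push_cast <;> ring
    · apply List.map_congr_left
      intro j _
      simp only [Function.comp]
      congr 1 <;> push_cast <;> ring

theorem SquareMatrix_eq (size : Int) : SquareMatrix size = SquareMatrix_alt size := by
  have hf : (fun (st : List (List Int) × Int) (_ : Int) =>
        let rn := (PySem.List.pyRange 0 size 1).foldl
          (fun (rn : List Int × Int) _ => (rn.1 ++ [rn.2], rn.2 + 1)) ([], st.2)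
        (st.1 ++ [rn.1], rn.2))
      = (fun (st : List (List Int) × Int) (_ : Int) =>
        (st.1 ++ [PySem.List.pyRange st.2 (st.2 + (PySem.List.pyRange 0 size 1).length) 1],
          st.2 + (PySem.List.pyRange 0 size 1).length)) := by
    funext st i
    simp [pvInner]
  simp only [SquareMatrix, SquareMatrix_alt]
  rw [hf, pvOuter]
  dsimp only
  by_cases h : size ≤ 0
  · simp [PySem.List.pyRange_one_eq_nil h, pvRows]
  · rw [not_le] at h
    have hlen : (PySem.List.pyRange 0 size 1).length = size.toNat := by
      rw [PySem.List.length_pyRange_one]; omega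
    rw [hlen, pvRows_eq_map, PySem.List.pyRange_one]
    rw [List.nil_append, List.map_map]
    have h0 : (size - 0).toNat = size.toNat := by omega
    rw [h0]
    apply List.map_congr_left
    intro j _
    simp only [Function.comp]
    congr 1 <;> push_cast [Int.toNat_of_nonneg (le_of_lt h)] <;> ring

-- ===== VERDICT (by name: the statement is the Claim_ definition above) =====
theorem SquareMatrix_spec : Claim_equal_SquareMatrix := by
  intro size _
  unfold Spec_SquareMatrix
  exact SquareMatrix_eq size
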